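-- pv_equiv track=rewrite | github.com/papibe/advent-of-code-2025 | python/day07/part1_v2.py | solve
-- ===== SOURCE A (Python) =====
-- from collections import deque
-- from typing import Deque, List, Set, Tuple
--
-- DIVIDER: str = "^"
--
-- def solve(start_row: int, start_col: int, grid: List[str]) -> int:
--     # BFS init
--     queue: Deque[Tuple[int, int]] = deque([(start_row, start_col)])
--     seen: Set[Tuple[int, int]] = set([(start_row, start_col)])
--     total_splits: int = 0
--
--     # BFS
--     while queue:
--         row: int
--         col: int
--         row, col = queue.popleft()
--
--         new_row: int = row + 1
--         new_col: int = col
--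
--         if not (0 <= new_row < len(grid) and 0 <= new_col < len(grid[0])):
--             continue
--
--         if grid[new_row][new_col] == DIVIDER:
--             total_splits += 1
--             for next_col in [new_col - 1, new_col + 1]:
--                 if (new_row, next_col) not in seen:
--                     queue.append((new_row, next_col))
--                     seen.add((new_row, next_col))
--         else:
--             if (new_row, new_col) not in seen:
--                 queue.append((new_row, new_col))
--                 seen.add((new_row, new_col))
--
--     return total_splits
-- ===== SOURCE B (Python) =====
-- DIVIDER: str = "^"
--
--
-- def solve(start_row: int, start_col: int, grid: list) -> int:
--     # Dense DP: one boolean reachability mask per row, updated like a cellular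
--     # automaton by pulling from the previous row; no queue, no sets of states.
--     height = len(grid)
--     width = len(grid[0]) if grid else 0
--     if start_row + 1 < 0:
--         return 0
--     active = [c == start_col for c in range(width)]
--     total = 0
--     for r in range(start_row + 1, height):
--         line = grid[r]
--         total += sum(1 for c in range(width) if active[c] and line[c] == DIVIDER)
--         active = [
--             (active[c] and line[c] != DIVIDER)
--             or (c > 0 and active[c - 1] and line[c - 1] == DIVIDER)
--             or (c + 1 < width and active[c + 1] and line[c + 1] == DIVIDER)
--             for c in range(width)
--         ]
--     return total
-- ===== Notes on version B (the rewrite author's own statement) =====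
-- stated objective: alternative
-- what changed: Replaces the explicit BFS over (row,col) states (deque plus a global seen-set of pairs) by a dense dynamic-programming sweep: one boolean reachability mask per row, updated cellular-automaton style by pulling each column's value from the previous row's mask, with the divider hits of a row counted by a single comprehension.
-- outside the precondition, e.g. on solve(0, 0, ['ab', 'c', 'dd']): A returns 0, B returns 0
import Mathlib
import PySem

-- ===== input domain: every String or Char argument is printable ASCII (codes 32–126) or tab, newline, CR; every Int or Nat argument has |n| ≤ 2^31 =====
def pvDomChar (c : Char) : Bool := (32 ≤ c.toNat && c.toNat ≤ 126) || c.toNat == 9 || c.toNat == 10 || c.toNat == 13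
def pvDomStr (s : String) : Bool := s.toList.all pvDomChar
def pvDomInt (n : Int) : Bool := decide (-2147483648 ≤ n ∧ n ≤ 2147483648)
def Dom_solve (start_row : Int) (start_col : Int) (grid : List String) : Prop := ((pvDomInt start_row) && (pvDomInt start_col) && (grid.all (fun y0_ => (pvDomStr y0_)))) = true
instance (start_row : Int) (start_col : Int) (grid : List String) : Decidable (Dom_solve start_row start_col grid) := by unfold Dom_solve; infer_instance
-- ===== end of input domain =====

-- B replaces A's BFS over (row,col) states (deque + seen set) by a dense per-row boolean
-- reachability mask updated like a cellular automaton (objective: alternative).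

-- shared cell read: grid[r][c] as both Pythons read it (exact under Pre_solve, where the indices are in range)
def pvCharAt (grid : List String) (r c : Int) : Char :=
  (PySem.Str.pyGet? (PySem.List.pyGetD grid r "") c).getD ' '

-- ===== PORT A =====
-- BFS loop of A; the Nat argument is a fuel bound on the number of dequeues (a totality guard only)
def bfsA (grid : List String) : Nat → List (Int × Int) → PySem.Set (Int × Int) → Int → Int
  | 0, _, _, total => total
  | _ + 1, [], _, total => total
  | fuel + 1, (row, col) :: queue, seen, total =>
    let newRow := row + 1
    let newCol := col
    if ¬ (0 ≤ newRow ∧ newRow < (grid.length : Int) ∧ 0 ≤ newCol ∧ newCol < ((grid.headD "").length : Int)) then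
      bfsA grid fuel queue seen total
    else if pvCharAt grid newRow newCol == '^' then
      let st := [newCol - 1, newCol + 1].foldl
        (fun (st : List (Int × Int) × PySem.Set (Int × Int)) next_col =>
          if PySem.Set.contains st.2 (newRow, next_col) then st
          else (st.1 ++ [(newRow, next_col)], PySem.Set.add st.2 (newRow, next_col)))
        (queue, seen)
      bfsA grid fuel st.1 st.2 (total + 1)
    else
      if PySem.Set.contains seen (newRow, newCol) then bfsA grid fuel queue seen total
      else bfsA grid fuel (queue ++ [(newRow, newCol)]) (PySem.Set.add seen (newRow, newCol)) total

def solve (start_row : Int) (start_col : Int) (grid : List String) : Int :=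
  bfsA grid (1 + (grid.length + 1) * ((grid.headD "").length + 2))
    [(start_row, start_col)] (PySem.Set.ofList [(start_row, start_col)]) 0

-- ===== PORT B =====
-- hits of one row: sum(1 for c in range(width) if active[c] and line[c] == DIVIDER)
def pvMaskHits (grid : List String) (width : Nat) (active : List Bool) (r : Int) : Int :=
  (((List.range width).filter
      (fun c => active.getD c false && (pvCharAt grid r (c : Int) == '^'))).length : Int)

-- next mask: the per-column pull-based comprehension of Source B
def pvMaskStep (grid : List String) (width : Nat) (r : Int) (active : List Bool) : List Bool :=
  (List.range width).map (fun c =>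
    (active.getD c false && !(pvCharAt grid r (c : Int) == '^'))
    || (decide (0 < c) && active.getD (c - 1) false && (pvCharAt grid r ((c : Int) - 1) == '^'))
    || (decide (c + 1 < width) && active.getD (c + 1) false && (pvCharAt grid r ((c : Int) + 1) == '^')))

-- body of Source B's for-loop over rows
def pvRowB (grid : List String) (width : Nat) (st : Int × List Bool) (r : Int) : Int × List Bool :=
  (st.1 + pvMaskHits grid width st.2 r, pvMaskStep grid width r st.2)

def solve_alt (start_row : Int) (start_col : Int) (grid : List String) : Int :=
  let height := (grid.length : Int)
  let width := (grid.headD "").length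
  if start_row + 1 < 0 then 0
  else
    ((PySem.List.pyRange (start_row + 1) height 1).foldl (pvRowB grid width)
      (0, (List.range width).map (fun (c : Nat) => decide ((c : Int) = start_col)))).1

-- ===== PRECONDITION & SPEC =====
-- Pre_solve excludes ragged grids (a row shorter than the first) unless the walk dies on its
-- first step: on ragged grids A can raise IndexError (it bounds columns only by len(grid[0]),
-- not by the actual row length); it still excludes some ragged grids A happens to return on
-- (the walk never reaches a short row), where B agrees with A or raises the same IndexError.
def Pre_solve (start_row : Int) (start_col : Int) (grid : List String) : Prop :=
  (∀ s ∈ grid, (grid.headD "").length ≤ s.length)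
  ∨ ¬ (0 ≤ start_row + 1 ∧ start_row + 1 < (grid.length : Int))
  ∨ ¬ (0 ≤ start_col ∧ start_col < ((grid.headD "").length : Int))

instance (start_row : Int) (start_col : Int) (grid : List String) : Decidable (Pre_solve start_row start_col grid) := by unfold Pre_solve; infer_instance

def pvWitness_solve : Int × Int × List String := (0, 1, ["...", ".^.", "..."])

def Spec_solve (start_row : Int) (start_col : Int) (grid : List String) (out : Int) : Prop := out = solve_alt start_row start_col grid
instance (start_row : Int) (start_col : Int) (grid : List String) (out : Int) : Decidable (Spec_solve start_row start_col grid out) := by unfold Spec_solve; infer_instance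

-- ===== CLAIM (what is proved, stated in full; the proofs are below) =====
def Claim_equal_solve : Prop := ∀ (start_row : Int) (start_col : Int) (grid : List String), Dom_solve start_row start_col grid → Pre_solve start_row start_col grid → Spec_solve start_row start_col grid (solve start_row start_col grid)

-- ===== LEMMAS AND PROOFS =====

-- proof-only ghost program: the sparse frontier sweep linking A's BFS to B's masks
def sweepStep (grid : List String) (r : Int) (acc : Int × PySem.Set Int) (col : Int) : Int × PySem.Set Int :=
  if 0 ≤ col ∧ col < ((grid.headD "").length : Int) then
    if pvCharAt grid (r + 1) col == '^' then
      (acc.1 + 1, PySem.Set.add (PySem.Set.add acc.2 (col - 1)) (col + 1))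
    else
      (acc.1, PySem.Set.add acc.2 col)
  else acc

def sweepLoop (grid : List String) : Nat → Int → PySem.Set Int → Int → Int
  | 0, _, _, total => total
  | n + 1, r, frontier, total =>
    if frontier = [] ∨ ¬ (0 ≤ r + 1 ∧ r + 1 < (grid.length : Int)) then total
    else
      let res := frontier.foldl (sweepStep grid r) (total, PySem.Set.empty)
      sweepLoop grid n (r + 1) res.2 res.1

theorem bfsA_nil (grid : List String) (fuel : Nat) (seen : PySem.Set (Int × Int)) (total : Int) :
    bfsA grid fuel [] seen total = total := by cases fuel <;> rfl

theorem bfsA_cons (grid : List String) (fuel : Nat) (row col : Int) (queue : List (Int × Int))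
    (seen : PySem.Set (Int × Int)) (total : Int) :
    bfsA grid (fuel + 1) ((row, col) :: queue) seen total =
    (if ¬ (0 ≤ row + 1 ∧ row + 1 < (grid.length : Int) ∧ 0 ≤ col ∧ col < ((grid.headD "").length : Int)) then
      bfsA grid fuel queue seen total
    else if pvCharAt grid (row + 1) col == '^' then
      let st := [col - 1, col + 1].foldl
        (fun (st : List (Int × Int) × PySem.Set (Int × Int)) next_col =>
          if PySem.Set.contains st.2 (row + 1, next_col) then st
          else (st.1 ++ [(row + 1, next_col)], PySem.Set.add st.2 (row + 1, next_col)))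
        (queue, seen)
      bfsA grid fuel st.1 st.2 (total + 1)
    else
      if PySem.Set.contains seen (row + 1, col) then bfsA grid fuel queue seen total
      else bfsA grid fuel (queue ++ [(row + 1, col)]) (PySem.Set.add seen (row + 1, col)) total) := rfl

theorem sweepLoop_succ (grid : List String) (n : Nat) (r : Int) (frontier : PySem.Set Int) (total : Int) :
    sweepLoop grid (n + 1) r frontier total =
    (if frontier = [] ∨ ¬ (0 ≤ r + 1 ∧ r + 1 < (grid.length : Int)) then total
    else
      let res := frontier.foldl (sweepStep grid r) (total, PySem.Set.empty)
      sweepLoop grid n (r + 1) res.2 res.1) := rfl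

-- out-of-range next row: the BFS just drains the remaining current-row states
theorem bfsA_drain (grid : List String) (r : Int)
    (h : ¬ (0 ≤ r + 1 ∧ r + 1 < (grid.length : Int))) :
    ∀ (front : List Int) (rest : Nat) (seen : PySem.Set (Int × Int)) (total : Int),
    bfsA grid (front.length + rest) (front.map (fun c => (r, c))) seen total = total := by
  intro front
  induction front with
  | nil => intro rest seen total; simpa using bfsA_nil grid rest seen total
  | cons c front ih =>
    intro rest seen total
    have hq : (c :: front).length + rest = (front.length + rest) + 1 := by
      simp [List.length_cons]; omega
    rw [hq, show ((c :: front).map (fun c => (r, c))) = (r, c) :: front.map (fun c => (r, c)) from rfl,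
        bfsA_cons]
    rw [if_pos (by intro hc; exact h ⟨hc.1, hc.2.1⟩)]
    exact ih rest seen total

-- one conditional enqueue of A matches one Set.add of the ghost sweep
theorem conditional_add (r x : Int) (pre : List (Int × Int)) (nq : PySem.Set Int)
    (seen : PySem.Set (Int × Int))
    (hmem : ∀ y : Int, (r + 1, y) ∈ seen ↔ y ∈ nq)
    (hrow : ∀ p ∈ seen, (p : Int × Int).1 ≤ r + 1) :
    ∃ seen₁ : PySem.Set (Int × Int),
      (if PySem.Set.contains seen (r + 1, x) = true then
        (pre ++ nq.map (fun c => (r + 1, c)), seen)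
       else ((pre ++ nq.map (fun c => (r + 1, c))) ++ [(r + 1, x)], PySem.Set.add seen (r + 1, x)))
        = (pre ++ (PySem.Set.add nq x).map (fun c => (r + 1, c)), seen₁)
      ∧ (∀ y : Int, (r + 1, y) ∈ seen₁ ↔ y ∈ PySem.Set.add nq x)
      ∧ (∀ p ∈ seen₁, (p : Int × Int).1 ≤ r + 1) := by
  by_cases hx : x ∈ nq
  · refine ⟨seen, ?_, ?_, hrow⟩
    · rw [if_pos ((PySem.Set.contains_iff _ _).mpr ((hmem x).mpr hx)), PySem.Set.add_of_mem hx]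
    · rw [PySem.Set.add_of_mem hx]; exact hmem
  · refine ⟨PySem.Set.add seen (r + 1, x), ?_, ?_, ?_⟩
    · rw [if_neg (fun h => hx ((hmem x).mp ((PySem.Set.contains_iff _ _).mp h))),
          PySem.Set.add_of_not_mem hx]
      simp [List.append_assoc]
    · intro y
      simp [PySem.Set.mem_add, hmem y, Prod.mk.injEq]
    · intro p hp
      rcases (PySem.Set.mem_add _ _ _).mp hp with h | h
      · exact hrow p h
      · subst h; simp

-- invariant-carrying result of one layer of the BFS
theorem bfsA_layer (grid : List String) (r : Int)
    (hr : 0 ≤ r + 1 ∧ r + 1 < (grid.length : Int)) :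
    ∀ (front : List Int) (nextq : PySem.Set Int) (rest : Nat) (seen : PySem.Set (Int × Int)) (total : Int),
    (∀ c : Int, (r + 1, c) ∈ seen ↔ c ∈ nextq) →
    (∀ p ∈ seen, (p : Int × Int).1 ≤ r + 1) →
    ∃ seen' : PySem.Set (Int × Int),
      bfsA grid (front.length + rest) (front.map (fun c => (r, c)) ++ nextq.map (fun c => (r + 1, c))) seen total
        = bfsA grid rest ((front.foldl (sweepStep grid r) (total, nextq)).2.map (fun c => (r + 1, c))) seen'
            (front.foldl (sweepStep grid r) (total, nextq)).1
      ∧ (∀ c : Int, (r + 1, c) ∈ seen' ↔ c ∈ (front.foldl (sweepStep grid r) (total, nextq)).2)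
      ∧ (∀ p ∈ seen', (p : Int × Int).1 ≤ r + 1) := by
  intro front
  induction front with
  | nil =>
    intro nextq rest seen total hmem hrow
    exact ⟨seen, by simp, hmem, hrow⟩
  | cons c front ih =>
    intro nextq rest seen total hmem hrow
    have hq : (c :: front).length + rest = (front.length + rest) + 1 := by
      simp [List.length_cons]; omega
    rw [hq,
        show ((c :: front).map (fun c => (r, c)) ++ nextq.map (fun c => (r + 1, c)))
          = (r, c) :: (front.map (fun c => (r, c)) ++ nextq.map (fun c => (r + 1, c))) from rfl,
        bfsA_cons,
        show (c :: front).foldl (sweepStep grid r) (total, nextq)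
          = front.foldl (sweepStep grid r) (sweepStep grid r (total, nextq) c) from rfl]
    by_cases hc : 0 ≤ c ∧ c < ((grid.headD "").length : Int)
    · rw [if_neg (not_not_intro ⟨hr.1, hr.2, hc.1, hc.2⟩)]
      by_cases hdiv : (pvCharAt grid (r + 1) c == '^') = true
      · rw [if_pos hdiv]
        have hstep : sweepStep grid r (total, nextq) c
            = (total + 1, PySem.Set.add (PySem.Set.add nextq (c - 1)) (c + 1)) := by
          unfold sweepStep; rw [if_pos hc, if_pos hdiv]
        rw [hstep]
        simp only [List.foldl_cons, List.foldl_nil]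
        obtain ⟨seen₁, he₁, hmem₁, hrow₁⟩ :=
          conditional_add r (c - 1) (front.map (fun c => (r, c))) nextq seen hmem hrow
        rw [he₁]
        obtain ⟨seen₂, he₂, hmem₂, hrow₂⟩ :=
          conditional_add r (c + 1) (front.map (fun c => (r, c)))
            (PySem.Set.add nextq (c - 1)) seen₁ hmem₁ hrow₁
        rw [he₂]
        exact ih (PySem.Set.add (PySem.Set.add nextq (c - 1)) (c + 1)) rest seen₂ (total + 1) hmem₂ hrow₂
      · rw [if_neg hdiv]
        have hstep : sweepStep grid r (total, nextq) c = (total, PySem.Set.add nextq c) := by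
          unfold sweepStep; rw [if_pos hc, if_neg hdiv]
        rw [hstep]
        by_cases hcm : c ∈ nextq
        · rw [if_pos ((PySem.Set.contains_iff _ _).mpr ((hmem c).mpr hcm)), PySem.Set.add_of_mem hcm]
          exact ih nextq rest seen total hmem hrow
        · rw [if_neg (fun h => hcm ((hmem c).mp ((PySem.Set.contains_iff _ _).mp h))),
              PySem.Set.add_of_not_mem hcm]
          have hmem' : ∀ y : Int, (r + 1, y) ∈ PySem.Set.add seen (r + 1, c) ↔ y ∈ nextq ++ [c] := by
            intro y
            simp [PySem.Set.mem_add, hmem y, Prod.mk.injEq]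
          have hrow' : ∀ p ∈ PySem.Set.add seen (r + 1, c), (p : Int × Int).1 ≤ r + 1 := by
            intro p hp
            rcases (PySem.Set.mem_add _ _ _).mp hp with h | h
            · exact hrow p h
            · subst h; simp
          have hgoalq : (front.map (fun c => (r, c)) ++ nextq.map (fun c => (r + 1, c))) ++ [(r + 1, c)]
              = front.map (fun c => (r, c)) ++ (nextq ++ [c]).map (fun c => (r + 1, c)) := by
            simp [List.append_assoc]
          rw [hgoalq]
          exact ih (nextq ++ [c]) rest (PySem.Set.add seen (r + 1, c)) total hmem' hrow'
    · rw [if_pos (fun h => hc ⟨h.2.2.1, h.2.2.2⟩)]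
      have hstep : sweepStep grid r (total, nextq) c = (total, nextq) := by
        unfold sweepStep; rw [if_neg hc]
      rw [hstep]
      exact ih nextq rest seen total hmem hrow

-- elements and distinctness of the frontier built by one layer of the sweep
theorem sweep_fold_bound (grid : List String) (r : Int) :
    ∀ (front : List Int) (acc : Int × PySem.Set Int),
    acc.2.Nodup → (∀ x ∈ acc.2, -1 ≤ x ∧ x ≤ ((grid.headD "").length : Int)) →
    (front.foldl (sweepStep grid r) acc).2.Nodup ∧
      ∀ x ∈ (front.foldl (sweepStep grid r) acc).2, -1 ≤ x ∧ x ≤ ((grid.headD "").length : Int) := by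
  intro front
  induction front with
  | nil => intro acc h1 h2; exact ⟨h1, h2⟩
  | cons c front ih =>
    intro acc h1 h2
    rw [List.foldl_cons]
    apply ih
    · unfold sweepStep
      split_ifs with hc hd
      · exact PySem.Set.nodup_add _ _ (PySem.Set.nodup_add _ _ h1)
      · exact PySem.Set.nodup_add _ _ h1
      · exact h1
    · unfold sweepStep
      split_ifs with hc hd
      · intro x hx
        rcases (PySem.Set.mem_add _ _ _).mp hx with hx | hx
        · rcases (PySem.Set.mem_add _ _ _).mp hx with hx | hx
          · exact h2 x hx
          · subst hx; constructor <;> omega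
        · subst hx; constructor <;> omega
      · intro x hx
        rcases (PySem.Set.mem_add _ _ _).mp hx with hx | hx
        · exact h2 x hx
        · subst hx; constructor <;> omega
      · exact h2

theorem nodup_interval_length (l : List Int) (W : Nat) (hnd : l.Nodup)
    (hb : ∀ x ∈ l, -1 ≤ x ∧ x ≤ (W : Int)) : l.length ≤ W + 2 := by
  have hsub : l.toFinset ⊆ Finset.Icc (-1 : Int) (W : Int) := by
    intro x hx
    exact Finset.mem_Icc.mpr (hb x (List.mem_toFinset.mp hx))
  have h1 : l.toFinset.card = l.length := List.toFinset_card_of_nodup hnd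
  have h2 : l.toFinset.card ≤ (Finset.Icc (-1 : Int) (W : Int)).card := Finset.card_le_card hsub
  rw [Int.card_Icc] at h2
  omega

-- A's BFS equals the ghost sweep (main induction over the sweep's layer counter)
theorem layers_eq (grid : List String) :
    ∀ (n : Nat) (r : Int) (front : PySem.Set Int) (seen : PySem.Set (Int × Int)) (total : Int) (extra : Nat),
    ((grid.length : Int) ≤ r + 1 + (n : Int) ∨ r + 1 < 0) →
    (∀ p ∈ seen, (p : Int × Int).1 ≤ r) →
    front.length ≤ (grid.headD "").length + 2 →
    bfsA grid (front.length + n * ((grid.headD "").length + 2) + extra) (front.map (fun c => (r, c))) seen total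
      = sweepLoop grid n r front total := by
  intro n
  induction n with
  | zero =>
    intro r front seen total extra hn hrow hlen
    have hout : ¬ (0 ≤ r + 1 ∧ r + 1 < (grid.length : Int)) := by
      rcases hn with hn | hn
      · simp only [Nat.cast_zero, add_zero] at hn
        omega
      · omega
    rw [Nat.add_assoc]
    exact bfsA_drain grid r hout front _ seen total
  | succ m ih =>
    intro r front seen total extra hn hrow hlen
    rw [sweepLoop_succ]
    by_cases hstop : front = [] ∨ ¬ (0 ≤ r + 1 ∧ r + 1 < (grid.length : Int))
    · rw [if_pos hstop]
      rcases hstop with hstop | hstop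
      · subst hstop
        simpa using bfsA_nil grid _ seen total
      · rw [Nat.add_assoc]
        exact bfsA_drain grid r hstop front _ seen total
    · rw [if_neg hstop]
      have hne := (not_or.mp hstop).1
      have hr := not_not.mp (not_or.mp hstop).2
      have hmem0 : ∀ c : Int, (r + 1, c) ∈ seen ↔ c ∈ (PySem.Set.empty : PySem.Set Int) := by
        intro c
        constructor
        · intro h
          have h2 : r + 1 ≤ r := hrow _ h
          omega
        · intro h
          simp [PySem.Set.empty] at h
      have hbnd := sweep_fold_bound grid r front (total, PySem.Set.empty)
        (by simp [PySem.Set.empty]) (by simp [PySem.Set.empty])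
      have hlen2 : (front.foldl (sweepStep grid r) (total, PySem.Set.empty)).2.length
          ≤ (grid.headD "").length + 2 :=
        nodup_interval_length _ _ hbnd.1 hbnd.2
      obtain ⟨seen', heq, hmem', hrow'⟩ :=
        bfsA_layer grid r hr front PySem.Set.empty
          ((front.foldl (sweepStep grid r) (total, PySem.Set.empty)).2.length
            + m * ((grid.headD "").length + 2)
            + (extra + ((grid.headD "").length + 2
                - (front.foldl (sweepStep grid r) (total, PySem.Set.empty)).2.length)))
          seen total hmem0 (fun p hp => le_trans (hrow p hp) (by omega))
      have hfuel : front.length + (m + 1) * ((grid.headD "").length + 2) + extra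
          = front.length + ((front.foldl (sweepStep grid r) (total, PySem.Set.empty)).2.length
            + m * ((grid.headD "").length + 2)
            + (extra + ((grid.headD "").length + 2
                - (front.foldl (sweepStep grid r) (total, PySem.Set.empty)).2.length))) := by
        rw [Nat.succ_mul]
        omega
      rw [hfuel,
          show (List.map (fun c => (r, c)) front)
            = List.map (fun c => (r, c)) front
              ++ List.map (fun c => (r + 1, c)) (PySem.Set.empty : PySem.Set Int) from by
            simp [PySem.Set.empty],
          heq]
      exact ih (r + 1) (front.foldl (sweepStep grid r) (total, PySem.Set.empty)).2 seen'
        (front.foldl (sweepStep grid r) (total, PySem.Set.empty)).1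
        (extra + ((grid.headD "").length + 2
          - (front.foldl (sweepStep grid r) (total, PySem.Set.empty)).2.length))
        (by
          rcases hn with hn | hn
          · left; push_cast at hn ⊢; omega
          · exact absurd hr.1 (by omega))
        hrow' hlen2

-- ===== the ghost sweep equals B's dense mask loop =====

-- mask of a frontier
def maskOf (W : Nat) (front : List Int) : List Bool :=
  (List.range W).map (fun (c : Nat) => decide ((c : Int) ∈ front))

theorem maskOf_getD (W : Nat) (front : List Int) (c : Nat) (hc : c < W) :
    (maskOf W front).getD c false = decide ((c : Int) ∈ front) := by
  unfold maskOf
  exact PySem.List.getD_map_range _ _ _ _ hc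

theorem maskOf_getD_ge (W : Nat) (front : List Int) (c : Nat) (hc : W ≤ c) :
    (maskOf W front).getD c false = false := by
  unfold maskOf
  rw [List.getD_eq_getElem?_getD, List.getElem?_eq_none (by simpa using hc)]
  rfl

-- total component of the sweep's fold: a per-element count
theorem sweep_fold_fst (grid : List String) (r : Int) :
    ∀ (front : List Int) (t : Int) (s : PySem.Set Int),
    (front.foldl (sweepStep grid r) (t, s)).1
      = t + ((front.filter (fun c => decide (0 ≤ c ∧ c < ((grid.headD "").length : Int))
                && (pvCharAt grid (r + 1) c == '^'))).length : Int) := by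
  intro front
  induction front with
  | nil => intro t s; simp
  | cons c front ih =>
    intro t s
    rw [List.foldl_cons, List.filter_cons]
    by_cases hc : 0 ≤ c ∧ c < ((grid.headD "").length : Int)
    · by_cases hd : (pvCharAt grid (r + 1) c == '^') = true
      · have hstep : sweepStep grid r (t, s) c
            = (t + 1, PySem.Set.add (PySem.Set.add s (c - 1)) (c + 1)) := by
          unfold sweepStep; rw [if_pos hc, if_pos hd]
        have hp : (decide (0 ≤ c ∧ c < ((grid.headD "").length : Int))
            && (pvCharAt grid (r + 1) c == '^')) = true := by
          simp only [Bool.and_eq_true, decide_eq_true_eq]; exact ⟨hc, hd⟩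
        rw [hstep, ih, if_pos hp]
        simp only [List.length_cons]
        push_cast
        ring
      · have hstep : sweepStep grid r (t, s) c = (t, PySem.Set.add s c) := by
          unfold sweepStep; rw [if_pos hc, if_neg hd]
        have hp : ¬ ((decide (0 ≤ c ∧ c < ((grid.headD "").length : Int))
            && (pvCharAt grid (r + 1) c == '^')) = true) := by
          simp only [Bool.and_eq_true, decide_eq_true_eq]
          rintro ⟨-, h⟩; exact hd h
        rw [hstep, ih, if_neg hp]
    · have hstep : sweepStep grid r (t, s) c = (t, s) := by
        unfold sweepStep; rw [if_neg hc]
      have hp : ¬ ((decide (0 ≤ c ∧ c < ((grid.headD "").length : Int))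
          && (pvCharAt grid (r + 1) c == '^')) = true) := by
        simp only [Bool.and_eq_true, decide_eq_true_eq]
        rintro ⟨h, -⟩; exact hc h
      rw [hstep, ih, if_neg hp]

-- membership in the frontier built by the sweep's fold
theorem sweep_fold_mem (grid : List String) (r : Int) :
    ∀ (front : List Int) (t : Int) (s : PySem.Set Int) (x : Int),
    (x ∈ (front.foldl (sweepStep grid r) (t, s)).2
      ↔ x ∈ s ∨ ∃ c ∈ front, (0 ≤ c ∧ c < ((grid.headD "").length : Int))
          ∧ (((pvCharAt grid (r + 1) c == '^') = true ∧ (x = c - 1 ∨ x = c + 1))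
             ∨ ((pvCharAt grid (r + 1) c == '^') = false ∧ x = c))) := by
  intro front
  induction front with
  | nil => intro t s x; simp
  | cons c front ih =>
    intro t s x
    rw [List.foldl_cons]
    by_cases hc : 0 ≤ c ∧ c < ((grid.headD "").length : Int)
    · by_cases hd : (pvCharAt grid (r + 1) c == '^') = true
      · have hstep : sweepStep grid r (t, s) c
            = (t + 1, PySem.Set.add (PySem.Set.add s (c - 1)) (c + 1)) := by
          unfold sweepStep; rw [if_pos hc, if_pos hd]
        rw [hstep, ih]
        simp only [PySem.Set.mem_add, List.mem_cons]
        constructor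
        · rintro (((h | h) | h) | ⟨c', hc', hrest⟩)
          · exact Or.inl h
          · exact Or.inr ⟨c, Or.inl rfl, hc, Or.inl ⟨hd, Or.inl h⟩⟩
          · exact Or.inr ⟨c, Or.inl rfl, hc, Or.inl ⟨hd, Or.inr h⟩⟩
          · exact Or.inr ⟨c', Or.inr hc', hrest⟩
        · rintro (h | ⟨c', hc' | hc', hrest⟩)
          · exact Or.inl (Or.inl (Or.inl h))
          · subst hc'
            rcases hrest.2 with ⟨_, h | h⟩ | ⟨hne, _⟩
            · exact Or.inl (Or.inl (Or.inr h))
            · exact Or.inl (Or.inr h)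
            · rw [hd] at hne; cases hne
          · exact Or.inr ⟨c', hc', hrest⟩
      · have hstep : sweepStep grid r (t, s) c = (t, PySem.Set.add s c) := by
          unfold sweepStep; rw [if_pos hc, if_neg hd]
        rw [hstep, ih]
        simp only [PySem.Set.mem_add, List.mem_cons]
        constructor
        · rintro ((h | h) | ⟨c', hc', hrest⟩)
          · exact Or.inl h
          · exact Or.inr ⟨c, Or.inl rfl, hc, Or.inr ⟨Bool.eq_false_iff.mpr hd, h⟩⟩
          · exact Or.inr ⟨c', Or.inr hc', hrest⟩
        · rintro (h | ⟨c', hc' | hc', hrest⟩)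
          · exact Or.inl (Or.inl h)
          · subst hc'
            rcases hrest.2 with ⟨hdd, _⟩ | ⟨_, h⟩
            · rw [hdd] at hd; cases hd rfl
            · exact Or.inl (Or.inr h)
          · exact Or.inr ⟨c', hc', hrest⟩
    · have hstep : sweepStep grid r (t, s) c = (t, s) := by
        unfold sweepStep; rw [if_neg hc]
      rw [hstep, ih]
      simp only [List.mem_cons]
      constructor
      · rintro (h | ⟨c', hc', hrest⟩)
        · exact Or.inl h
        · exact Or.inr ⟨c', Or.inr hc', hrest⟩
      · rintro (h | ⟨c', hc' | hc', hrest⟩)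
        · exact Or.inl h
        · subst hc'; exact absurd hrest.1 hc
        · exact Or.inr ⟨c', hc', hrest⟩

-- counting a set of in-range columns: Int-side filter = Nat-side filter over range W
theorem count_int_nat (front : List Int) (W : Nat) (d : Int → Bool) (hnd : front.Nodup) :
    ((front.filter (fun c => decide (0 ≤ c ∧ c < (W : Int)) && d c)).length : Int)
      = (((List.range W).filter (fun (n : Nat) => decide ((n : Int) ∈ front) && d (n : Int))).length : Int) := by
  have h1 : (front.filter (fun c => decide (0 ≤ c ∧ c < (W : Int)) && d c)).Nodup :=
    hnd.filter _
  have h2 : ((List.range W).filter (fun (n : Nat) => decide ((n : Int) ∈ front) && d (n : Int))).Nodup :=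
    (List.nodup_range).filter _
  have himg : (front.filter (fun c => decide (0 ≤ c ∧ c < (W : Int)) && d c)).toFinset
      = Finset.image (fun n : Nat => (n : Int))
          ((List.range W).filter (fun (n : Nat) => decide ((n : Int) ∈ front) && d (n : Int))).toFinset := by
    ext x
    simp only [List.mem_toFinset, List.mem_filter, Finset.mem_image, List.mem_range,
      Bool.and_eq_true, decide_eq_true_eq]
    constructor
    · rintro ⟨hxf, ⟨hx0, hxW⟩, hdx⟩
      refine ⟨x.toNat, ⟨⟨by omega, ?_, ?_⟩, by omega⟩⟩
      · rw [Int.toNat_of_nonneg hx0]; exact hxf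
      · rw [Int.toNat_of_nonneg hx0]; exact hdx
    · rintro ⟨n, ⟨⟨hnW, hnf, hdn⟩, hnx⟩⟩
      subst hnx
      exact ⟨hnf, ⟨by omega, by omega⟩, hdn⟩
  have := congrArg Finset.card himg
  rw [List.toFinset_card_of_nodup h1,
      Finset.card_image_of_injective _ (fun a b h => by exact_mod_cast h),
      List.toFinset_card_of_nodup h2] at this
  exact_mod_cast this

-- the sweep's per-row increment is B's pvMaskHits
theorem hits_eq (grid : List String) (r : Int) (front : List Int) (t : Int) (hnd : front.Nodup) :
    (front.foldl (sweepStep grid r) (t, PySem.Set.empty)).1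
      = t + pvMaskHits grid (grid.headD "").length (maskOf (grid.headD "").length front) (r + 1) := by
  rw [sweep_fold_fst]
  congr 1
  rw [count_int_nat front (grid.headD "").length (fun c => pvCharAt grid (r + 1) c == '^') hnd]
  unfold pvMaskHits
  have hfe : (List.range (grid.headD "").length).filter
      (fun (n : Nat) => decide ((n : Int) ∈ front) && (pvCharAt grid (r + 1) (n : Int) == '^'))
    = (List.range (grid.headD "").length).filter
      (fun (c : Nat) => (maskOf (grid.headD "").length front).getD c false
          && (pvCharAt grid (r + 1) (c : Int) == '^')) := by
    apply List.filter_congr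
    intro c hc
    rw [maskOf_getD _ _ _ (List.mem_range.mp hc)]
  rw [hfe]

-- the sweep's next frontier, as a mask, is B's pvMaskStep
theorem maskOf_guard (W : Nat) (front : List Int) (c : Nat) :
    (decide (c < W) && (maskOf W front).getD c false)
      = decide (c < W ∧ ((c : Nat) : Int) ∈ front) := by
  by_cases h : c < W
  · rw [maskOf_getD _ _ _ h]; simp [h]
  · rw [maskOf_getD_ge _ _ _ (Nat.le_of_not_lt h)]; simp [h]

theorem mask_step_eq (grid : List String) (r : Int) (front : List Int) (t : Int) :
    pvMaskStep grid (grid.headD "").length (r + 1) (maskOf (grid.headD "").length front)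
      = maskOf (grid.headD "").length (front.foldl (sweepStep grid r) (t, PySem.Set.empty)).2 := by
  unfold pvMaskStep
  rw [show maskOf (grid.headD "").length (front.foldl (sweepStep grid r) (t, PySem.Set.empty)).2
      = (List.range (grid.headD "").length).map
          (fun (c : Nat) => decide ((c : Int) ∈ (front.foldl (sweepStep grid r) (t, PySem.Set.empty)).2))
      from rfl]
  apply List.map_congr_left
  intro c hc
  have hcW : c < (grid.headD "").length := List.mem_range.mp hc
  have hc1W : c - 1 < (grid.headD "").length := by omega
  rw [maskOf_getD _ _ _ hcW, maskOf_getD _ _ _ hc1W, maskOf_guard]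
  rw [Bool.eq_iff_iff]
  simp only [Bool.or_eq_true, Bool.and_eq_true, Bool.not_eq_true', decide_eq_true_eq]
  rw [sweep_fold_mem]
  constructor
  · rintro ((⟨hm, hnd⟩ | ⟨⟨hpos, hm⟩, hd⟩) | ⟨⟨hlt, hm⟩, hd⟩)
    · exact Or.inr ⟨(c : Int), hm, ⟨by omega, by omega⟩, Or.inr ⟨hnd, rfl⟩⟩
    · refine Or.inr ⟨((c - 1 : Nat) : Int), hm, ⟨by omega, by omega⟩,
        Or.inl ⟨?_, Or.inr (by omega)⟩⟩
      rw [show ((c - 1 : Nat) : Int) = (c : Int) - 1 from by omega]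
      exact hd
    · refine Or.inr ⟨((c + 1 : Nat) : Int), hm, ⟨by omega, by omega⟩,
        Or.inl ⟨?_, Or.inl (by omega)⟩⟩
      rw [show ((c + 1 : Nat) : Int) = (c : Int) + 1 from by omega]
      exact hd
  · rintro (h | ⟨c', hc', ⟨hc'0, hc'W⟩, hrest⟩)
    · simp [PySem.Set.empty] at h
    · rcases hrest with ⟨hd, hx | hx⟩ | ⟨hd, hx⟩
      · -- divider at c' = c + 1 spawned column c
        have hc'c : c' = ((c + 1 : Nat) : Int) := by omega
        subst hc'c
        refine Or.inr ⟨⟨by omega, hc'⟩, ?_⟩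
        rw [show ((c + 1 : Nat) : Int) = (c : Int) + 1 from by omega] at hd
        exact hd
      · -- divider at c' = c - 1 spawned column c
        have hpos : 0 < c := by omega
        have hc'c : c' = ((c - 1 : Nat) : Int) := by omega
        subst hc'c
        refine Or.inl (Or.inr ⟨⟨hpos, hc'⟩, ?_⟩)
        rw [show ((c : Int) - 1) = ((c - 1 : Nat) : Int) from by omega]
        exact hd
      · -- same column, not a divider
        have hc'c : c' = (c : Int) := by omega
        subst hc'c
        exact Or.inl (Or.inl ⟨hc', hd⟩)

-- an all-false mask is dead: folding any rows keeps the total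
theorem dead_fold (grid : List String) (W : Nat) :
    ∀ (rs : List Int) (t : Int) (mask : List Bool),
    (∀ c : Nat, mask.getD c false = false) →
    (rs.foldl (pvRowB grid W) (t, mask)).1 = t := by
  intro rs
  induction rs with
  | nil => intro t mask _; rfl
  | cons r rs ih =>
    intro t mask hm
    rw [List.foldl_cons]
    have hhits : pvMaskHits grid W mask r = 0 := by
      unfold pvMaskHits
      rw [List.filter_eq_nil_iff.mpr (by intro c _; rw [hm c]; simp)]
      rfl
    have hnext : ∀ c : Nat, (pvMaskStep grid W r mask).getD c false = false := by
      intro c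
      by_cases hc : c < W
      · unfold pvMaskStep
        rw [PySem.List.getD_map_range _ _ _ _ hc, hm c, hm (c - 1), hm (c + 1)]
        simp
      · unfold pvMaskStep
        rw [List.getD_eq_getElem?_getD, List.getElem?_eq_none (by simpa using Nat.le_of_not_lt hc)]
        rfl
    have := ih (t + pvMaskHits grid W mask r) (pvMaskStep grid W r mask) hnext
    rw [show pvRowB grid W (t, mask) r = (t + pvMaskHits grid W mask r, pvMaskStep grid W r mask) from rfl,
        this, hhits, add_zero]

-- the ghost sweep equals B's fold over the remaining rows
theorem sweep_eq_mask (grid : List String) :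
    ∀ (n : Nat) (r : Int) (front : PySem.Set Int) (total : Int),
    ((grid.length : Int) ≤ r + 1 + (n : Int)) → 0 ≤ r + 1 → front.Nodup →
    sweepLoop grid n r front total
      = ((PySem.List.pyRange (r + 1) (grid.length : Int) 1).foldl
          (pvRowB grid (grid.headD "").length)
          (total, maskOf (grid.headD "").length front)).1 := by
  intro n
  induction n with
  | zero =>
    intro r front total hn h0 hnd
    have hempty : PySem.List.pyRange (r + 1) (grid.length : Int) 1 = [] := by
      rw [PySem.List.pyRange_one]
      rw [show ((grid.length : Int) - (r + 1)).toNat = 0 by omega]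
      rfl
    rw [hempty]
    rfl
  | succ m ih =>
    intro r front total hn h0 hnd
    rw [sweepLoop_succ]
    by_cases hstop : front = [] ∨ ¬ (0 ≤ r + 1 ∧ r + 1 < (grid.length : Int))
    · rw [if_pos hstop]
      by_cases hrow : 0 ≤ r + 1 ∧ r + 1 < (grid.length : Int)
      · -- front must be empty: the dead-mask fold keeps the total
        have hfe : front = [] := by
          rcases hstop with h | h
          · exact h
          · exact absurd hrow h
        subst hfe
        rw [dead_fold grid (grid.headD "").length _ total (maskOf (grid.headD "").length [])]
        intro c
        by_cases hc : c < (grid.headD "").length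
        · rw [maskOf_getD _ _ _ hc]; simp
        · exact maskOf_getD_ge _ _ _ (Nat.le_of_not_lt hc)
      · have hempty : PySem.List.pyRange (r + 1) (grid.length : Int) 1 = [] := by
          rw [PySem.List.pyRange_one]
          rw [show ((grid.length : Int) - (r + 1)).toNat = 0 by omega]
          rfl
        rw [hempty]
        rfl
    · rw [if_neg hstop]
      have hne := (not_or.mp hstop).1
      have hr := not_not.mp (not_or.mp hstop).2
      rw [PySem.List.pyRange_one_cons hr.2, List.foldl_cons]
      have hbnd := sweep_fold_bound grid r front (total, PySem.Set.empty)
        (by simp [PySem.Set.empty]) (by simp [PySem.Set.empty])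
      have hrow : pvRowB grid (grid.headD "").length (total, maskOf (grid.headD "").length front) (r + 1)
          = ((front.foldl (sweepStep grid r) (total, PySem.Set.empty)).1,
             maskOf (grid.headD "").length (front.foldl (sweepStep grid r) (total, PySem.Set.empty)).2) := by
        unfold pvRowB
        rw [← hits_eq grid r front total hnd, mask_step_eq grid r front total]
      rw [hrow]
      have := ih (r + 1) (front.foldl (sweepStep grid r) (total, PySem.Set.empty)).2
        (front.foldl (sweepStep grid r) (total, PySem.Set.empty)).1
        (by push_cast at hn ⊢; omega) (by omega) hbnd.1
      rw [this]

-- ===== VERDICT (by name: the statement is the Claim_ definition above) =====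
theorem solve_spec : Claim_equal_solve := by
  intro start_row start_col grid _ hpre
  unfold Spec_solve solve solve_alt
  by_cases hneg : start_row + 1 < 0
  · rw [if_pos hneg]
    have hdrain := bfsA_drain grid start_row (by omega) [start_col]
      ((grid.length + 1) * ((grid.headD "").length + 2))
      (PySem.Set.ofList [(start_row, start_col)]) 0
    simpa using hdrain
  · rw [if_neg hneg]
    have h0 : 0 ≤ start_row + 1 := by omega
    have hof : (PySem.Set.ofList [(start_row, start_col)]) = [(start_row, start_col)] := rfl
    have hfr : [(start_row, start_col)] = ([start_col] : List Int).map (fun c => (start_row, c)) := rfl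
    have hl := layers_eq grid (grid.length + 1) start_row ([start_col] : PySem.Set Int)
      (([start_col] : List Int).map (fun c => (start_row, c))) 0 0
      (by left; push_cast; omega)
      (by intro p hp; simp at hp; subst hp; simp)
      (by simp)
    have hfuel : 1 + (grid.length + 1) * ((grid.headD "").length + 2)
        = ([start_col] : List Int).length + (grid.length + 1) * ((grid.headD "").length + 2) + 0 := by
      simp
    rw [hof, hfr, hfuel, hl]
    have hmask : maskOf (grid.headD "").length [start_col]
        = (List.range (grid.headD "").length).map (fun (c : Nat) => decide ((c : Int) = start_col)) := by
      unfold maskOf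
      apply List.map_congr_left
      intro c _
      simp
    rw [sweep_eq_mask grid (grid.length + 1) start_row ([start_col] : PySem.Set Int) 0
        (by push_cast; omega) h0 (by simp), hmask]
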